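-- pv_equiv track=rewrite | github.com/AdamZhouSE/pythonHomework | Code/CodeRecords/2206/60698/274482.py | func
-- ===== SOURCE A (Python) =====
-- def func(n):
--     if n==1:
--         return 1
--     else:
--         res=func(n-1)
--         multi=1
--         k=0
--         for j in range(1,n):
--             k=k+j
--         k=k+1
--         for i in range(0,n):
--             multi=multi*(k+i)
--         res=res+multi
--         return res
-- ===== SOURCE B (Python) =====
-- def func(n):
--     total = 0
--     for m in range(1, n + 1):
--         start = m * (m - 1) // 2 + 1
--         term = 1
--         for i in range(m):
--             term *= start + i
--         total += term
--     return total
-- ===== Notes on version B (the rewrite author's own statement) =====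
-- stated objective: simpler
-- what changed: Replaces A's recursion and inner summation loop with a single iterative accumulation that computes each block's first element by the closed form m*(m-1)//2 + 1.
import Mathlib
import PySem

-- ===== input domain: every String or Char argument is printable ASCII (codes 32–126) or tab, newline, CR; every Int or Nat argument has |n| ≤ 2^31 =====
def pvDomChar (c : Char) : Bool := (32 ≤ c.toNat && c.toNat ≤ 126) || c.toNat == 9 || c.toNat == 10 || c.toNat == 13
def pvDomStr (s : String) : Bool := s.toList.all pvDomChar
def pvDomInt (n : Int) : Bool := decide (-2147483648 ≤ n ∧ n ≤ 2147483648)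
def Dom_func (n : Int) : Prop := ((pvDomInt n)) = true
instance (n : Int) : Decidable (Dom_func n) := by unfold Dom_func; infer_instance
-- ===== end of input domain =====

-- B replaces A's recursion and inner summing loop by one iterative accumulation using
-- the closed form m*(m-1)//2 + 1 for each block's first element (objective: simpler).
-- For n < 1 Python A never reaches its base case (RecursionError): excluded by Pre_.

-- ===== PORT A =====
-- The guard 'n ≤ 1' (Python tests 'n == 1') only makes the recursion total; for n < 1
-- Python A diverges, which lies outside Pre_func.
def func (n : Int) : Int :=
  if n ≤ 1 then 1
  else
    let res := func (n - 1)
    let k := (PySem.List.pyRange 1 n 1).foldl (fun acc j => acc + j) 0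
    let k := k + 1
    let multi := (PySem.List.pyRange 0 n 1).foldl (fun acc i => acc * (k + i)) 1
    res + multi
termination_by n.toNat
decreasing_by omega

-- ===== PORT B =====
def func_alt (n : Int) : Int :=
  (PySem.List.pyRange 1 (n + 1) 1).foldl (fun total m =>
    let start := PySem.Int.floordiv (m * (m - 1)) 2 + 1
    let term := (PySem.List.pyRange 0 m 1).foldl (fun t i => t * (start + i)) 1
    total + term) 0

-- ===== PRECONDITION & SPEC =====
-- Pre_ excludes n < 1, where Python A recurses past its base case and raises RecursionError.
def Pre_func (n : Int) : Prop := 1 ≤ n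
instance (n : Int) : Decidable (Pre_func n) := by unfold Pre_func; infer_instance
def pvWitness_func : Int := 3
def Spec_func (n : Int) (out : Int) : Prop := out = func_alt n
instance (n : Int) (out : Int) : Decidable (Spec_func n out) := by unfold Spec_func; infer_instance

-- ===== CLAIM (what is proved, stated in full; the proofs are below) =====
def Claim_equal_func : Prop := ∀ (n : Int), Dom_func n → Pre_func n → Spec_func n (func n)

-- ===== LEMMAS AND PROOFS =====

-- A's first inner loop: the running sum 0 + 1 + … + (n-1)
def pvSum (n : Int) : Int := (PySem.List.pyRange 1 n 1).foldl (fun acc j => acc + j) 0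

lemma pvSum_succ (n : Int) (h : 1 ≤ n) : pvSum (n + 1) = pvSum n + n := by
  unfold pvSum
  rw [PySem.List.pyRange_one_succ_right (by omega), List.foldl_append]
  rfl

lemma two_mul_pvSum : ∀ (k : Nat), 2 * pvSum (1 + (k : Int)) = (1 + (k : Int)) * ((1 + (k : Int)) - 1) := by
  intro k
  induction k with
  | zero => decide
  | succ m ih =>
      have h : (1 + ((m : Int) + 1)) = (1 + (m : Int)) + 1 := by ring
      push_cast
      rw [h, pvSum_succ _ (by omega)]
      push_cast at ih
      nlinarith [ih]

lemma pvSum_eq_floordiv (n : Int) (h : 1 ≤ n) :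
    pvSum n = PySem.Int.floordiv (n * (n - 1)) 2 := by
  obtain ⟨k, rfl⟩ : ∃ k : Nat, n = 1 + (k : Int) := ⟨(n - 1).toNat, by omega⟩
  have h2 := two_mul_pvSum k
  symm
  rw [PySem.Int.floordiv_eq_iff_of_pos (by omega)]
  generalize hA : (1 + (k : Int)) * (1 + (k : Int) - 1) = A at h2 ⊢
  omega

-- the two inner product loops agree once the starting value agrees
lemma main_lemma : ∀ (k : Nat), func (1 + (k : Int)) = func_alt (1 + (k : Int)) := by
  intro k
  induction k with
  | zero =>
      show func 1 = func_alt 1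
      rw [func]
      simp [func_alt]
      decide
  | succ m ih =>
      set n : Int := 1 + (m : Int) with hn
      have hn1 : (1 : Int) ≤ n := by omega
      have hcast : (1 + ((m : Int) + 1)) = n + 1 := by rw [hn]; ring
      push_cast
      rw [hcast]
      -- unfold A one step
      rw [func]
      rw [if_neg (by omega)]
      simp only [show n + 1 - 1 = n from by ring]
      -- unfold B one step
      unfold func_alt
      rw [show n + 1 + 1 = (n + 1) + 1 from rfl,
          PySem.List.pyRange_one_succ_right (a := 1) (b := n + 1) (by omega : (1:Int) ≤ n + 1),
          List.foldl_append]
      simp only [List.foldl_cons, List.foldl_nil]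
      rw [← func_alt, ← ih]
      -- the two product loops: start values coincide
      have hS : (PySem.List.pyRange 1 (n + 1) 1).foldl (fun acc j => acc + j) 0
          = PySem.Int.floordiv ((n + 1) * (n + 1 - 1)) 2 :=
        pvSum_eq_floordiv (n + 1) (by omega)
      rw [hS]
  
-- ===== VERDICT (by name: the statement is the Claim_ definition above) =====
theorem func_spec : Claim_equal_func := by
  intro n _ hpre
  unfold Pre_func at hpre
  obtain ⟨k, rfl⟩ : ∃ k : Nat, n = 1 + (k : Int) := ⟨(n - 1).toNat, by omega⟩
  exact main_lemma k
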